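-- pv_equiv track=rewrite | github.com/weaviate-git-bot/FII | anul3/Python/Laboratory2/ex9.py | bad_luck_spectators
-- ===== SOURCE A (Python) =====
-- from typing import List, Tuple
--
-- def bad_luck_spectators(spectators: List[List[int]]) -> List[Tuple[int, int]]:
--     results = []
--
--     cached_rows = dict()
--
--     s_t = list(zip(*spectators))
--
--     for idx in range(len(s_t)):
--         row = s_t[idx]
--         row_size = len(row)
--         for col_1 in range(1, row_size):
--             for col_2 in range(0, col_1):
--                 val = f"{col_1, idx}"
--                 if row[col_1] <= row[col_2] and val not in cached_rows.keys():
--                     results.append((col_1, idx))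
--                     cached_rows[val] = True
--
--
--     return results
-- ===== SOURCE B (Python) =====
-- from typing import List, Tuple
--
-- def bad_luck_spectators(spectators: List[List[int]]) -> List[Tuple[int, int]]:
--     # One pass per column with a running maximum instead of comparing each
--     # element against every earlier element in the column.
--     if not spectators:
--         return []
--     m = min(len(row) for row in spectators)
--     results = []
--     for c in range(m):
--         mx = spectators[0][c]
--         for r in range(1, len(spectators)):
--             v = spectators[r][c]
--             if v <= mx:
--                 results.append((r, c))
--             else:
--                 mx = v
--     return results
-- ===== Notes on version B (the rewrite author's own statement) =====
-- stated objective: faster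
-- what changed: Replaces the transpose plus the quadratic all-earlier-pairs scan with dedup dict by a single running-maximum pass down each column, appending a position when its value does not exceed the running maximum.
import Mathlib
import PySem

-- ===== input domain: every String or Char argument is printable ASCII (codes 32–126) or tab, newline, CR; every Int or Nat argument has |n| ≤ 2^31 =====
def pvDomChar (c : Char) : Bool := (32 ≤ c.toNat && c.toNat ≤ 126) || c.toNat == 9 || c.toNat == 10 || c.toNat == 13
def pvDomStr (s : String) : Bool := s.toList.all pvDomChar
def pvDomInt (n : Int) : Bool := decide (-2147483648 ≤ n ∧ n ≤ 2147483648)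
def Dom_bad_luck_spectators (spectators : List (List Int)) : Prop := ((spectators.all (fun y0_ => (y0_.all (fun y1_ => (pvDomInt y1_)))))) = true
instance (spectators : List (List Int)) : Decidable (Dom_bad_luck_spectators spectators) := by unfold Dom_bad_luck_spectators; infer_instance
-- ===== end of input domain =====

-- B replaces A's transpose + quadratic all-earlier-pairs scan (with a dedup dict) by one
-- running-maximum pass per column; the return values are proved equal on every input.

-- ===== PORT A =====
-- min of the row lengths: the truncation performed by zip(*spectators) (A) and by min(len(row)...) (B)
def pvMinLen (rows : List (List Int)) : Nat :=
  match rows with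
  | [] => 0
  | r :: rs => rs.foldl (fun m t => min m t.length) r.length

-- list(zip(*spectators)): the list of columns; every index accessed is below every
-- row's length, so getD's default is never used (exact port of zip's truncation)
def pvZipStar (rows : List (List Int)) : List (List Int) :=
  (List.range (pvMinLen rows)).map (fun c => rows.map (fun r => r.getD c 0))

-- body of A's innermost loop; Python's cache key f"{col_1, idx}" is a string that is
-- injective on the (col_1, idx) pairs, ported as the pair itself
def pvAStep (row : List Int) (c1 idx : Nat)
    (st : List (Int × Int) × PySem.Dict (Nat × Nat) Bool) (c2 : Nat) :
    List (Int × Int) × PySem.Dict (Nat × Nat) Bool :=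
  if row.getD c1 0 ≤ row.getD c2 0 ∧ (st.2.get? (c1, idx)).isNone then
    (st.1 ++ [((c1 : Int), (idx : Int))], st.2.insert (c1, idx) true)
  else st

def bad_luck_spectators (spectators : List (List Int)) : List (Int × Int) :=
  ((List.range (pvZipStar spectators).length).foldl
    (fun st idx =>
      (List.range' 1 (((pvZipStar spectators).getD idx []).length - 1)).foldl
        (fun st c1 => (List.range c1).foldl (pvAStep ((pvZipStar spectators).getD idx []) c1 idx) st) st)
    ([], PySem.Dict.empty)).1

-- ===== PORT B =====
def bad_luck_spectators_alt (spectators : List (List Int)) : List (Int × Int) :=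
  match spectators with
  | [] => []
  | r0 :: rest =>
    (List.range (pvMinLen spectators)).foldl
      (fun res (c : Nat) =>
        (rest.foldl
          (fun (st : List (Int × Int) × Int × Nat) row =>
            if row.getD c 0 ≤ st.2.1 then (st.1 ++ [((st.2.2 : Int), (c : Int))], st.2.1, st.2.2 + 1)
            else (st.1, row.getD c 0, st.2.2 + 1))
          (res, r0.getD c 0, 1)).1)
      []

-- ===== PRECONDITION & SPEC =====
def Spec_bad_luck_spectators (spectators : List (List Int)) (out : List (Int × Int)) : Prop := out = bad_luck_spectators_alt spectators
instance (spectators : List (List Int)) (out : List (Int × Int)) : Decidable (Spec_bad_luck_spectators spectators out) := by unfold Spec_bad_luck_spectators; infer_instance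

-- ===== CLAIM (what is proved, stated in full; the proofs are below) =====
def Claim_equal_bad_luck_spectators : Prop := ∀ (spectators : List (List Int)), Dom_bad_luck_spectators spectators → Spec_bad_luck_spectators spectators (bad_luck_spectators spectators)

-- ===== LEMMAS AND PROOFS =====

-- position r of column `row` has some earlier element not below it
def pvBad (row : List Int) (r : Nat) : Bool :=
  (List.range r).any (fun j => decide (row.getD r 0 ≤ row.getD j 0))

-- all bad positions of one column, the common specification both ports are reduced to
def pvColSpec (row : List Int) (idx : Nat) : List (Int × Int) :=
  ((List.range' 1 (row.length - 1)).filter (pvBad row)).map (fun r => ((r : Int), (idx : Int)))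

def pvSpecAll (spectators : List (List Int)) : List (Int × Int) :=
  ((List.range (pvMinLen spectators)).map
    (fun c => pvColSpec (spectators.map (fun r => r.getD c 0)) c)).flatten

-- ---------- A side ----------

theorem pvAStep_skip (row : List Int) (c1 idx : Nat) (js : List Nat)
    (st : List (Int × Int) × PySem.Dict (Nat × Nat) Bool)
    (h : st.2.get? (c1, idx) ≠ none) :
    js.foldl (pvAStep row c1 idx) st = st := by
  induction js with
  | nil => rfl
  | cons j js ih =>
      have hs : pvAStep row c1 idx st j = st := by
        unfold pvAStep
        rw [if_neg]
        rintro ⟨-, h2⟩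
        exact h (Option.isNone_iff_eq_none.mp h2)
      rw [List.foldl_cons, hs, ih]

theorem pvAInner (row : List Int) (c1 idx : Nat) (js : List Nat)
    (res : List (Int × Int)) (d : PySem.Dict (Nat × Nat) Bool)
    (h : d.get? (c1, idx) = none) :
    js.foldl (pvAStep row c1 idx) (res, d) =
      if js.any (fun j => decide (row.getD c1 0 ≤ row.getD j 0)) then
        (res ++ [((c1 : Int), (idx : Int))], d.insert (c1, idx) true)
      else (res, d) := by
  induction js with
  | nil => simp
  | cons j js ih =>
      rw [List.foldl_cons, List.any_cons]
      by_cases hle : row.getD c1 0 ≤ row.getD j 0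
      · have hs : pvAStep row c1 idx (res, d) j
            = (res ++ [((c1 : Int), (idx : Int))], d.insert (c1, idx) true) := by
          unfold pvAStep
          rw [if_pos ⟨hle, by simp [h]⟩]
        have hcond : (decide (row.getD c1 0 ≤ row.getD j 0)
            || js.any fun j => decide (row.getD c1 0 ≤ row.getD j 0)) = true := by
          rw [decide_eq_true hle, Bool.true_or]
        rw [hs, pvAStep_skip row c1 idx js _ (by simp [PySem.Dict.get?_insert_self]),
          if_pos hcond]
      · have hs : pvAStep row c1 idx (res, d) j = (res, d) := by
          unfold pvAStep
          rw [if_neg]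
          rintro ⟨h1, -⟩
          exact hle h1
        have hcond : (decide (row.getD c1 0 ≤ row.getD j 0)
            || js.any fun j => decide (row.getD c1 0 ≤ row.getD j 0))
            = js.any fun j => decide (row.getD c1 0 ≤ row.getD j 0) := by
          rw [decide_eq_false hle, Bool.false_or]
        rw [hs, ih, hcond]

theorem pvACol (row : List Int) (idx : Nat) (L : List Nat) (hnd : L.Nodup)
    (res : List (Int × Int)) (d : PySem.Dict (Nat × Nat) Bool)
    (h : ∀ c1 ∈ L, d.get? (c1, idx) = none) :
    (L.foldl (fun st c1 => (List.range c1).foldl (pvAStep row c1 idx) st) (res, d)).1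
        = res ++ (L.filter (pvBad row)).map (fun r => ((r : Int), (idx : Int)))
      ∧ ∀ k : Nat × Nat, k ∉ L.map (fun c1 => (c1, idx)) →
        (L.foldl (fun st c1 => (List.range c1).foldl (pvAStep row c1 idx) st) (res, d)).2.get? k
          = d.get? k := by
  induction L generalizing res d with
  | nil => simp
  | cons c1 L ih =>
      obtain ⟨hc1, hnd'⟩ := List.nodup_cons.mp hnd
      simp only [List.foldl_cons]
      rw [pvAInner row c1 idx _ res d (h c1 (List.mem_cons_self))]
      have hbad : ((List.range c1).any fun j => decide (row.getD c1 0 ≤ row.getD j 0))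
          = pvBad row c1 := rfl
      by_cases hb : pvBad row c1 = true
      case neg =>
        have hb' : pvBad row c1 = false := Bool.eq_false_iff.mpr hb
        rw [hbad, hb', if_neg (by simp)]
        obtain ⟨ih1, ih2⟩ := ih hnd' res d (fun c1' hm => h c1' (List.mem_cons_of_mem _ hm))
        refine ⟨?_, ?_⟩
        · rw [ih1, List.filter_cons, hb']
          simp
        · intro k hk
          simp only [List.map_cons, List.mem_cons, not_or] at hk
          exact ih2 k hk.2
      · rw [hbad, hb, if_pos rfl]
        have hnone : ∀ c1' ∈ L, (d.insert (c1, idx) true).get? (c1', idx) = none := by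
          intro c1' hm
          rw [PySem.Dict.get?_insert_of_ne]
          · exact h c1' (List.mem_cons_of_mem _ hm)
          · intro he
            injection he with h1 _
            exact hc1 (h1 ▸ hm)
        obtain ⟨ih1, ih2⟩ := ih hnd' _ _ hnone
        refine ⟨?_, ?_⟩
        · rw [ih1, List.filter_cons, hb]
          simp
        · intro k hk
          simp only [List.map_cons, List.mem_cons, not_or] at hk
          rw [ih2 k hk.2, PySem.Dict.get?_insert_of_ne _ _ hk.1]

theorem pvAOuter (s_t : List (List Int)) (I : List Nat) (hnd : I.Nodup)
    (res : List (Int × Int)) (d : PySem.Dict (Nat × Nat) Bool)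
    (h : ∀ idx ∈ I, ∀ c1, d.get? (c1, idx) = none) :
    (I.foldl (fun st idx =>
        (List.range' 1 ((s_t.getD idx []).length - 1)).foldl
          (fun st c1 => (List.range c1).foldl (pvAStep (s_t.getD idx []) c1 idx) st) st)
        (res, d)).1
        = res ++ (I.map (fun idx => pvColSpec (s_t.getD idx []) idx)).flatten
      ∧ ∀ k : Nat × Nat, k.2 ∉ I →
        (I.foldl (fun st idx =>
          (List.range' 1 ((s_t.getD idx []).length - 1)).foldl
            (fun st c1 => (List.range c1).foldl (pvAStep (s_t.getD idx []) c1 idx) st) st)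
          (res, d)).2.get? k = d.get? k := by
  induction I generalizing res d with
  | nil => simp
  | cons idx I ih =>
      obtain ⟨hidx, hnd'⟩ := List.nodup_cons.mp hnd
      simp only [List.foldl_cons]
      obtain ⟨st1, st2, hst⟩ : ∃ st1 st2,
          ((List.range' 1 ((s_t.getD idx []).length - 1)).foldl
            (fun st c1 => (List.range c1).foldl (pvAStep (s_t.getD idx []) c1 idx) st)
            (res, d)) = (st1, st2) := ⟨_, _, rfl⟩
      obtain ⟨hc1, hc2⟩ := pvACol (s_t.getD idx []) idx _ (List.nodup_range' 1)
        res d (fun c1 _ => h idx (List.mem_cons_self) c1)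
      rw [hst] at hc1 hc2
      have hd' : ∀ idx' ∈ I, ∀ c1, st2.get? (c1, idx') = none := by
        intro idx' hm c1
        rw [hc2 (c1, idx')]
        · exact h idx' (List.mem_cons_of_mem _ hm) c1
        · intro hmem
          obtain ⟨c1', hmm, he⟩ := List.mem_map.mp hmem
          have h2 : idx = idx' := congrArg Prod.snd he
          exact hidx (by rw [h2]; exact hm)
      obtain ⟨ih1, ih2⟩ := ih hnd' st1 st2 hd'
      have hc1' : st1 = res ++ pvColSpec (s_t.getD idx []) idx := hc1
      rw [hst]
      refine ⟨?_, ?_⟩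
      · rw [ih1, hc1', List.map_cons, List.flatten_cons, List.append_assoc]
      · intro k hk
        simp only [List.mem_cons, not_or] at hk
        rw [ih2 k hk.2, hc2 k]
        intro hmem
        obtain ⟨c1', hmm, he⟩ := List.mem_map.mp hmem
        have h2 : idx = k.2 := congrArg Prod.snd he
        exact hk.1 h2.symm

theorem pvZipStar_length (rows : List (List Int)) :
    (pvZipStar rows).length = pvMinLen rows := by
  simp [pvZipStar]

theorem pvZipStar_getD (rows : List (List Int)) (idx : Nat) (h : idx < pvMinLen rows) :
    (pvZipStar rows).getD idx [] = rows.map (fun r => r.getD idx 0) := by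
  unfold pvZipStar
  rw [List.getD_eq_getElem?_getD]
  simp [h]

theorem pvA_eq_spec (sp : List (List Int)) : bad_luck_spectators sp = pvSpecAll sp := by
  unfold bad_luck_spectators
  obtain ⟨h1, h2⟩ := pvAOuter (pvZipStar sp) (List.range (pvZipStar sp).length)
    List.nodup_range [] PySem.Dict.empty
    (fun _ _ _ => PySem.Dict.get?_empty _)
  rw [h1, List.nil_append, pvSpecAll, pvZipStar_length]
  congr 1
  apply List.map_congr_left
  intro idx hidx
  rw [pvZipStar_getD sp idx (List.mem_range.mp hidx)]

-- ---------- B side ----------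

theorem pv_le_foldl_max (v x0 : Int) (l : List Int) :
    v ≤ l.foldl max x0 ↔ v ≤ x0 ∨ ∃ y ∈ l, v ≤ y := by
  induction l generalizing x0 with
  | nil => simp
  | cons y l ih =>
      rw [List.foldl_cons, ih]
      simp only [le_max_iff, List.mem_cons]
      constructor
      · rintro ((h | h) | ⟨z, hz, h⟩)
        · exact Or.inl h
        · exact Or.inr ⟨y, Or.inl rfl, h⟩
        · exact Or.inr ⟨z, Or.inr hz, h⟩
      · rintro (h | ⟨z, (rfl | hz), h⟩)
        · exact Or.inl (Or.inl h)
        · exact Or.inl (Or.inr h)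
        · exact Or.inr ⟨z, hz, h⟩

theorem pv_exists_getD (v : Int) (xs : List Int) :
    (∃ j, j < xs.length ∧ v ≤ xs.getD j 0) ↔ ∃ y ∈ xs, v ≤ y := by
  constructor
  · rintro ⟨j, hj, hle⟩
    refine ⟨xs.getD j 0, ?_, hle⟩
    rw [List.getD_eq_getElem?_getD, List.getElem?_eq_getElem hj]
    exact List.getElem_mem hj
  · rintro ⟨y, hy, hle⟩
    obtain ⟨j, hj, rfl⟩ := List.mem_iff_getElem.mp hy
    refine ⟨j, hj, ?_⟩
    rw [List.getD_eq_getElem?_getD, List.getElem?_eq_getElem hj]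
    exact hle

theorem pvBad_succ (x0 v : Int) (done l : List Int) :
    pvBad (x0 :: (done ++ v :: l)) (done.length + 1) = true ↔ v ≤ done.foldl max x0 := by
  have hget : (x0 :: (done ++ v :: l)).getD (done.length + 1) 0 = v := by
    rw [List.getD_cons_succ, List.getD_append_right _ _ _ _ (le_refl _)]
    simp
  have hpre : ∀ j, j < done.length + 1 →
      (x0 :: (done ++ v :: l)).getD j 0 = (x0 :: done).getD j 0 := by
    intro j hj
    cases j with
    | zero => rfl
    | succ j =>
        rw [List.getD_cons_succ, List.getD_cons_succ,
          List.getD_append _ _ _ _ (Nat.lt_of_succ_lt_succ hj)]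
  unfold pvBad
  rw [List.any_eq_true]
  constructor
  · rintro ⟨j, hj, hle⟩
    rw [List.mem_range] at hj
    rw [hget, hpre j hj] at hle
    rw [pv_le_foldl_max]
    have := (pv_exists_getD v (x0 :: done)).mp ⟨j, by simpa using hj, of_decide_eq_true hle⟩
    obtain ⟨y, hy, hvy⟩ := this
    rcases List.mem_cons.mp hy with rfl | hy
    · exact Or.inl hvy
    · exact Or.inr ⟨y, hy, hvy⟩
  · intro hle
    rw [pv_le_foldl_max] at hle
    have : ∃ y ∈ x0 :: done, v ≤ y := by
      rcases hle with h | ⟨y, hy, h⟩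
      · exact ⟨x0, List.mem_cons_self, h⟩
      · exact ⟨y, List.mem_cons_of_mem _ hy, h⟩
    obtain ⟨j, hj, hle'⟩ := (pv_exists_getD v (x0 :: done)).mpr this
    refine ⟨j, List.mem_range.mpr (by simpa using hj), ?_⟩
    rw [hget, hpre j (by simpa using hj)]
    exact decide_eq_true hle'

theorem pvBCol (c : Nat) (x0 : Int) (l done : List Int) (res : List (Int × Int)) :
    (l.foldl
        (fun (st : List (Int × Int) × Int × Nat) (v : Int) =>
          if v ≤ st.2.1 then (st.1 ++ [((st.2.2 : Int), (c : Int))], st.2.1, st.2.2 + 1)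
          else (st.1, v, st.2.2 + 1))
        (res, done.foldl max x0, done.length + 1)).1
      = res ++ ((List.range' (done.length + 1) l.length).filter
          (pvBad (x0 :: (done ++ l)))).map (fun r => ((r : Int), (c : Int))) := by
  induction l generalizing done res with
  | nil => simp
  | cons v l ih =>
      rw [List.foldl_cons]
      have hlen : (done ++ [v]).length = done.length + 1 := by simp
      have hx : done ++ [v] ++ l = done ++ v :: l := by simp
      by_cases hle : v ≤ done.foldl max x0
      · rw [if_pos hle]
        have hb : pvBad (x0 :: (done ++ v :: l)) (done.length + 1) = true :=
          (pvBad_succ x0 v done l).mpr hle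
        have hmax : (done ++ [v]).foldl max x0 = done.foldl max x0 := by
          rw [List.foldl_append]
          simp [max_eq_left hle]
        have hrec := ih (done ++ [v]) (res ++ [(((done.length + 1 : Nat) : Int), (c : Int))])
        rw [hlen, hmax, hx] at hrec
        refine hrec.trans ?_
        rw [List.length_cons, List.range'_succ, List.filter_cons, hb]
        simp
      · rw [if_neg hle]
        have hb : pvBad (x0 :: (done ++ v :: l)) (done.length + 1) = false :=
          Bool.eq_false_iff.mpr (fun ht => hle ((pvBad_succ x0 v done l).mp ht))
        have hmax : (done ++ [v]).foldl max x0 = v := by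
          rw [List.foldl_append]
          simp [max_eq_right (le_of_lt (not_le.mp hle))]
        have hrec := ih (done ++ [v]) res
        rw [hlen, hmax, hx] at hrec
        refine hrec.trans ?_
        rw [List.length_cons, List.range'_succ, List.filter_cons, hb]
        simp

theorem pvB_eq_spec (sp : List (List Int)) : bad_luck_spectators_alt sp = pvSpecAll sp := by
  cases sp with
  | nil => rfl
  | cons r0 rest =>
      have hcol : ∀ (res : List (Int × Int)) (c : Nat),
          (rest.foldl
            (fun (st : List (Int × Int) × Int × Nat) row =>
              if row.getD c 0 ≤ st.2.1 then (st.1 ++ [((st.2.2 : Int), (c : Int))], st.2.1, st.2.2 + 1)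
              else (st.1, row.getD c 0, st.2.2 + 1))
            (res, r0.getD c 0, 1)).1
          = res ++ pvColSpec ((r0 :: rest).map (fun r => r.getD c 0)) c := by
        intro res c
        have hfm := (List.foldl_map
          (f := fun r : List Int => r.getD c 0)
          (g := fun (st : List (Int × Int) × Int × Nat) (v : Int) =>
            if v ≤ st.2.1 then (st.1 ++ [((st.2.2 : Int), (c : Int))], st.2.1, st.2.2 + 1)
            else (st.1, v, st.2.2 + 1))
          (l := rest) (init := (res, r0.getD c 0, 1)))
        have hcolv := pvBCol c (r0.getD c 0) (rest.map (fun r => r.getD c 0)) [] res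
        simp only [List.length_nil, List.nil_append, List.foldl_nil, Nat.zero_add] at hcolv
        have : (rest.foldl
            (fun (st : List (Int × Int) × Int × Nat) row =>
              if row.getD c 0 ≤ st.2.1 then (st.1 ++ [((st.2.2 : Int), (c : Int))], st.2.1, st.2.2 + 1)
              else (st.1, row.getD c 0, st.2.2 + 1))
            (res, r0.getD c 0, 1)).1
            = res ++ ((List.range' 1 (rest.map (fun r => r.getD c 0)).length).filter
                (pvBad (r0.getD c 0 :: rest.map (fun r => r.getD c 0)))).map
                (fun r => ((r : Int), (c : Int))) := by
          refine Eq.trans ?_ hcolv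
          exact congrArg Prod.fst hfm.symm
        rw [this, pvColSpec]
        simp
      calc bad_luck_spectators_alt (r0 :: rest)
          = (List.range (pvMinLen (r0 :: rest))).foldl
              (fun res (c : Nat) => res ++ pvColSpec ((r0 :: rest).map (fun r => r.getD c 0)) c) [] := by
            exact PySem.List.foldl_congr_mem _ _ _ _ (fun acc c _ => hcol acc c)
        _ = pvSpecAll (r0 :: rest) := by
            rw [PySem.List.foldl_append_eq_flatMap, List.nil_append, pvSpecAll, List.flatMap_def]

-- ===== VERDICT (by name: the statement is the Claim_ definition above) =====
theorem bad_luck_spectators_spec : Claim_equal_bad_luck_spectators := by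
  intro sp _
  unfold Spec_bad_luck_spectators
  rw [pvA_eq_spec, pvB_eq_spec]
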